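-- pv_equiv track=rewrite | github.com/pabloschwarzenberg/grader | hito2_ej3/hito2_ej3_872eeed2c7745f3dd496a0b73ea19880.py | adn
-- ===== SOURCE A (Python) =====
-- def adn(s,n):
--
--     i=0
--
--     s=s.lower()
--
--     l=len(s)
--
--     n=int(n)
--
--     lista=[]
--
--     lista2=[]
--
--     while i<=l-n:
--
--         a=s[i:i+n]
--
--         if (a in lista)==False:
--
--             lista.append(a)
--
--             i=i+1
--
--         elif (a in lista)==True and (a in lista2)==False:
--
--             lista2.append(a)
--
--             i=i+1
--
--         else:
--
--             i=i+1
--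
--
--
--     b=0
--
--     w=len(lista2)
--
--     while b<w:
--
--         q=lista2[b]
--
--         lista.remove(q)
--
--         b=b+1
--
--     if lista==[]:
--
--         return ["ninguna"]
--
--     return lista
-- ===== SOURCE B (Python) =====
-- def adn(s, n):
--     s = s.lower()
--     n = int(n)
--     counts = {}
--     for i in range(len(s) - n + 1):
--         a = s[i:i+n]
--         counts[a] = counts.get(a, 0) + 1
--     res = [a for a, c in counts.items() if c == 1]
--     if res == []:
--         return ["ninguna"]
--     return res
-- ===== Notes on version B (the rewrite author's own statement) =====
-- stated objective: faster
-- what changed: Replaces A's three membership-scan lists plus a remove loop with a single pass that counts each length-n substring in an insertion-ordered dict and emits the keys with count 1.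
import Mathlib
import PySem

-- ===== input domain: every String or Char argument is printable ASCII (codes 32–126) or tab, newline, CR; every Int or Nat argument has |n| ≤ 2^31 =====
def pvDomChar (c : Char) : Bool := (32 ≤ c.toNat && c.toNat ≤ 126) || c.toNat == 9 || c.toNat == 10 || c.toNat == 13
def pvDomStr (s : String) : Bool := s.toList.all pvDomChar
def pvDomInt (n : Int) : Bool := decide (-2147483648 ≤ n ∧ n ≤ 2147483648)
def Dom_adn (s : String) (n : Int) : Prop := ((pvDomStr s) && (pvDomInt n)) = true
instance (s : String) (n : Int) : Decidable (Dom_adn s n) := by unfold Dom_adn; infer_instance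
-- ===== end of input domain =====

-- B replaces A's quadratic membership-scan lists and remove loop with one counting pass over a dict (objective: faster).

-- ===== PORT A =====
-- the body of A's while-loop (i advances by 1 in every branch, so it is a fold over range(0, l-n+1))
def adnStep (st : List String × List String) (a : String) : List String × List String :=
  if st.1.contains a = false then (st.1 ++ [a], st.2)
  else if st.1.contains a && !st.2.contains a then (st.1, st.2 ++ [a])
  else st

def adn (s : String) (n : Int) : List String :=
  let cs := (PySem.Str.lower s).toList
  let st := (PySem.List.pyRange 0 ((cs.length : Int) - n + 1) 1).foldl
      (fun st i => adnStep st (String.ofList (PySem.List.slice cs (some i) (some (i + n))))) ([], [])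
  -- lista.remove(q): every q of lista2 is in lista, so Python's ValueError never fires; getD keeps the port total
  let lista := st.2.foldl (fun acc q => (PySem.List.remove? acc q).getD acc) st.1
  if lista = [] then ["ninguna"] else lista

-- ===== PORT B =====
def adn_alt (s : String) (n : Int) : List String :=
  let cs := (PySem.Str.lower s).toList
  let counts := (PySem.List.pyRange 0 ((cs.length : Int) - n + 1) 1).foldl
      (fun (d : PySem.Dict String Int) i =>
        let a := String.ofList (PySem.List.slice cs (some i) (some (i + n)))
        d.insert a (d.getD a 0 + 1)) PySem.Dict.empty
  let res := (counts.items.filter (fun p => p.2 == 1)).map (fun p => p.1)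
  if res = [] then ["ninguna"] else res

-- ===== PRECONDITION & SPEC =====
def Spec_adn (s : String) (n : Int) (out : List String) : Prop := out = adn_alt s n
instance (s : String) (n : Int) (out : List String) : Decidable (Spec_adn s n out) := by unfold Spec_adn; infer_instance

-- ===== CLAIM (what is proved, stated in full; the proofs are below) =====
def Claim_equal_adn : Prop := ∀ (s : String) (n : Int), Dom_adn s n → Spec_adn s n (adn s n)

-- ===== LEMMAS AND PROOFS =====

-- how adnStep acts, by case on the two membership tests
theorem adnStep_not_mem (st : List String × List String) (x : String) (hx : x ∉ st.1) :
    adnStep st x = (st.1 ++ [x], st.2) := by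
  simp [adnStep, hx]

theorem adnStep_mem_not_mem (st : List String × List String) (x : String)
    (hx : x ∈ st.1) (hx2 : x ∉ st.2) : adnStep st x = (st.1, st.2 ++ [x]) := by
  simp [adnStep, hx, hx2]

theorem adnStep_mem_mem (st : List String × List String) (x : String)
    (hx : x ∈ st.1) (hx2 : x ∈ st.2) : adnStep st x = st := by
  simp [adnStep, hx, hx2]

-- invariant of A's while-loop: lista is the first-occurrence dedup of the processed substrings,
-- lista2 holds (without repetition) exactly the substrings seen at least twice
theorem adn_loop_inv (xs : List String) :
    (xs.foldl adnStep ([], [])).1 = PySem.Set.ofList xs ∧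
    (xs.foldl adnStep ([], [])).2.Nodup ∧
    ∀ y, y ∈ (xs.foldl adnStep ([], [])).2 ↔ 2 ≤ xs.count y := by
  induction xs using List.reverseRecOn with
  | nil => simp [PySem.Set.ofList_nil]
  | append_singleton xs x ih =>
    obtain ⟨h1, h2, h3⟩ := ih
    rw [List.foldl_append, List.foldl_cons, List.foldl_nil]
    by_cases hx : x ∈ (xs.foldl adnStep ([], [])).1
    · have hxs : x ∈ xs := by rwa [h1, PySem.Set.mem_ofList] at hx
      by_cases hx2 : x ∈ (xs.foldl adnStep ([], [])).2
      · rw [adnStep_mem_mem _ _ hx hx2]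
        refine ⟨?_, h2, ?_⟩
        · rw [h1, PySem.Set.ofList_append_singleton, PySem.Set.add_of_mem (by rwa [h1] at hx)]
        · intro y
          rw [h3 y, List.count_append]
          by_cases hyx : y = x
          · subst hyx
            have hc := (h3 y).mp hx2
            rw [List.count_singleton_self]
            omega
          · simp [Ne.symm hyx]
      · rw [adnStep_mem_not_mem _ _ hx hx2]
        refine ⟨?_, ?_, ?_⟩
        · rw [h1, PySem.Set.ofList_append_singleton, PySem.Set.add_of_mem (by rwa [h1] at hx)]
        · refine (List.nodup_append).mpr ⟨h2, List.nodup_singleton x, ?_⟩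
          intro a ha b hb
          rw [List.mem_singleton] at hb
          subst hb
          exact fun h => hx2 (h ▸ ha)
        · intro y
          rw [List.mem_append, h3 y, List.count_append]
          by_cases hyx : y = x
          · subst hyx
            have h1c : 1 ≤ xs.count y := List.one_le_count_iff.mpr hxs
            rw [List.count_singleton_self]
            constructor
            · intro _; omega
            · intro _; exact Or.inr (List.mem_singleton_self y)
          · simp [Ne.symm hyx, hyx]
    · rw [adnStep_not_mem _ _ hx]
      have hxs : x ∉ xs := by rwa [h1, PySem.Set.mem_ofList] at hx
      refine ⟨?_, h2, ?_⟩
      · rw [h1, PySem.Set.ofList_append_singleton,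
          PySem.Set.add_of_not_mem (by rwa [h1] at hx)]
      · intro y
        rw [h3 y, List.count_append]
        by_cases hyx : y = x
        · subst hyx
          have h0 : xs.count y = 0 := List.count_eq_zero.mpr hxs
          rw [List.count_singleton_self]
          omega
        · simp [Ne.symm hyx]

-- A's removal loop is list difference
theorem remove_foldl_eq_diff (lb la : List String) :
    lb.foldl (fun acc q => (PySem.List.remove? acc q).getD acc) la = la.diff lb := by
  induction lb generalizing la with
  | nil => simp
  | cons q lb ih =>
    rw [List.foldl_cons, List.diff_cons, ← ih]
    congr 1
    by_cases hq : q ∈ la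
    · rw [PySem.List.remove?_eq_some_erase la q hq, Option.getD_some]
    · rw [(PySem.List.remove?_eq_none_iff la q).mpr hq, Option.getD_none,
        List.erase_of_not_mem hq]

-- the two loop results, compared for an arbitrary substring list R.map g
theorem adn_main (g : Int → String) (R : List Int) :
    (if (R.foldl (fun st i => adnStep st (g i)) ([], [])).2.foldl
          (fun acc q => (PySem.List.remove? acc q).getD acc)
          (R.foldl (fun st i => adnStep st (g i)) ([], [])).1 = [] then ["ninguna"]
      else (R.foldl (fun st i => adnStep st (g i)) ([], [])).2.foldl
          (fun acc q => (PySem.List.remove? acc q).getD acc)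
          (R.foldl (fun st i => adnStep st (g i)) ([], [])).1)
    = (if ((R.foldl (fun (d : PySem.Dict String Int) i =>
              d.insert (g i) (d.getD (g i) 0 + 1)) PySem.Dict.empty).items.filter
            (fun p => p.2 == 1)).map (fun p => p.1) = [] then ["ninguna"]
      else ((R.foldl (fun (d : PySem.Dict String Int) i =>
              d.insert (g i) (d.getD (g i) 0 + 1)) PySem.Dict.empty).items.filter
            (fun p => p.2 == 1)).map (fun p => p.1)) := by
  have hA : List.foldl (fun st i => adnStep st (g i)) ([], []) R
      = List.foldl adnStep ([], []) (R.map g) := (List.foldl_map).symm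
  have hB : List.foldl (fun d i => d.insert (g i) (d.getD (g i) 0 + 1)) PySem.Dict.empty R
      = PySem.Dict.counter (R.map g) := by
    rw [← PySem.Dict.foldl_insert_getD_add_one_eq_counter]
    exact (List.foldl_map (f := g)
      (g := fun (d : PySem.Dict String Int) x => d.insert x (d.getD x 0 + 1))).symm
  rw [hA, hB]
  set subs := R.map g with hsubs
  obtain ⟨h1, h2, h3⟩ := adn_loop_inv subs
  rw [remove_foldl_eq_diff, h1, (PySem.Set.nodup_ofList subs).diff_eq_filter,
    PySem.Dict.items_counter, List.filter_map, List.map_map]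
  have hfil : List.filter (fun y => decide (y ∉ (subs.foldl adnStep ([], [])).2))
        (PySem.Set.ofList subs)
      = List.filter (fun k => (List.count k subs : Int) == 1) (PySem.Set.ofList subs) := by
    apply List.filter_congr
    intro y hy
    have hy1 : 1 ≤ List.count y subs :=
      List.one_le_count_iff.mpr ((PySem.Set.mem_ofList subs y).mp hy)
    by_cases h : 2 ≤ List.count y subs
    · have ha : y ∈ (subs.foldl adnStep ([], [])).2 := (h3 y).mpr h
      have hb : ¬ ((List.count y subs : Int) = 1) := by omega
      simp [ha, hb]
    · have ha : y ∉ (subs.foldl adnStep ([], [])).2 := fun m => h ((h3 y).mp m)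
      have hb : (List.count y subs : Int) = 1 := by omega
      simp [ha, hb]
  rw [hfil]
  simp only [Function.comp_def]
  simp

-- ===== VERDICT (by name: the statement is the Claim_ definition above) =====
theorem adn_spec : Claim_equal_adn := by
  intro s n _
  unfold Spec_adn adn adn_alt
  exact adn_main
    (fun i => String.ofList (PySem.List.slice (PySem.Str.lower s).toList (some i) (some (i + n))))
    (PySem.List.pyRange 0 (((PySem.Str.lower s).toList.length : Int) - n + 1) 1)
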